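-- pv_equiv track=rewrite | github.com/ben-tanen/ben-tanen.github.io | _env/notion_bridge/transforms.py | _build_video_include
-- ===== SOURCE A (Python) =====
-- def _quote_param(value: str) -> str:
--     """Quote a value for a Liquid include tag, choosing quotes to avoid escaping."""
--     if '"' in value:
--         return f"'{value}'"
--     return f'"{value}"'
--
-- def _build_video_include(src: str, params: dict[str, str]) -> str:
--     """Build {% include video.html src="..." %} with optional params."""
--     parts = [f'src="{src}"']
--     for key in ("width", "height", "controls"):
--         if key in params:
--             parts.append(f'{key}={_quote_param(params[key])}')
--     for key, value in params.items():
--         if key not in ("width", "height", "controls"):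
--             parts.append(f'{key}={_quote_param(value)}')
--     return '{%% include video.html %s %%}' % " ".join(parts)
-- ===== SOURCE B (Python) =====
-- def _quote_param(value: str) -> str:
--     """Quote a value for a Liquid include tag, choosing quotes to avoid escaping."""
--     if '"' in value:
--         return f"'{value}'"
--     return f'"{value}"'
--
-- _PRIORITY = {"width": 0, "height": 1, "controls": 2}
--
-- def _build_video_include(src: str, params: dict[str, str]) -> str:
--     """Build {% include video.html src="..." %} with optional params."""
--     items = sorted(params.items(), key=lambda kv: _PRIORITY.get(kv[0], 3))
--     parts = [f'src="{src}"'] + [f'{k}={_quote_param(v)}' for k, v in items]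
--     return '{%% include video.html %s %%}' % " ".join(parts)
-- ===== Notes on version B (the rewrite author's own statement) =====
-- stated objective: alternative
-- what changed: Replaces A's two passes (a fixed-key membership/lookup pass for width/height/controls plus a filter pass over the remaining items) with a single stable sort of params.items() under a priority rank (width 0, height 1, controls 2, default 3) followed by one emit pass.
import Mathlib
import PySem

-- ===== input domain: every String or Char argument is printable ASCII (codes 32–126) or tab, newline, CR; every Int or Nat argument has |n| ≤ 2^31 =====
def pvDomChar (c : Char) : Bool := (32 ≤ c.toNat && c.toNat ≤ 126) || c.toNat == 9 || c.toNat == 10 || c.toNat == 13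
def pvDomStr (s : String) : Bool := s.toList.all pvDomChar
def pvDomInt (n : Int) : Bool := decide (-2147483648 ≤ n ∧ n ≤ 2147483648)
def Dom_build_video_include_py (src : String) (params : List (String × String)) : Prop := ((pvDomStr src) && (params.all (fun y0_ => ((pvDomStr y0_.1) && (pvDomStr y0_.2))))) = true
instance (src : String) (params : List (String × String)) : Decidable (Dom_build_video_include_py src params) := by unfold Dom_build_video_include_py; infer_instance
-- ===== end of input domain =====

-- B replaces A's fixed-key membership pass plus filter pass by one stable sort of the
-- items under a priority rank (width 0, height 1, controls 2, other 3) and a single emit pass.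

-- ===== PORT A =====

-- shared module helper _quote_param
def quoteParam (value : String) : String :=
  if PySem.Str.isIn "\"" value then "'" ++ value ++ "'" else "\"" ++ value ++ "\""

-- dict membership+lookup `key in params` / `params[key]`; exact for the unique keys a dict has
def pyLookup : List (String × String) → String → Option String
  | [], _ => none
  | kv :: t, key => if kv.1 == key then some kv.2 else pyLookup t key

def build_video_include_py (src : String) (params : List (String × String)) : String :=
  let parts : List String := ["src=\"" ++ src ++ "\""]
  let parts := ["width", "height", "controls"].foldl (fun ps key =>
      match pyLookup params key with
      | some v => ps ++ [key ++ "=" ++ quoteParam v]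
      | none => ps) parts
  let parts := params.foldl (fun ps kv =>
      if !(kv.1 == "width" || kv.1 == "height" || kv.1 == "controls") then
        ps ++ [kv.1 ++ "=" ++ quoteParam kv.2]
      else ps) parts
  "{% include video.html " ++ PySem.Str.join " " parts ++ " %}"

-- ===== PORT B =====

-- hand port of _PRIORITY.get(k, 3) for the three-entry literal dict; exact
def pvRank (k : String) : Int :=
  if k == "width" then 0 else if k == "height" then 1 else if k == "controls" then 2 else 3

def build_video_include_py_alt (src : String) (params : List (String × String)) : String :=
  let items := PySem.List.sorted params (fun kv => pvRank kv.1) false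
  let parts : List String :=
    ("src=\"" ++ src ++ "\"") :: items.map (fun kv => kv.1 ++ "=" ++ quoteParam kv.2)
  "{% include video.html " ++ PySem.Str.join " " parts ++ " %}"

-- ===== PRECONDITION & SPEC =====
-- Pre_ requires the association list to have pairwise-distinct keys: params is a Python
-- dict[str, str], so a list with a duplicated key represents no actual input of A.
def Pre_build_video_include_py (src : String) (params : List (String × String)) : Prop :=
  (params.map Prod.fst).Nodup
instance (src : String) (params : List (String × String)) : Decidable (Pre_build_video_include_py src params) := by unfold Pre_build_video_include_py; infer_instance

def pvWitness_build_video_include_py : String × (List (String × String)) :=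
  ("vid.mp4", [("loop", "1"), ("height", "240")])

def Spec_build_video_include_py (src : String) (params : List (String × String)) (out : String) : Prop := out = build_video_include_py_alt src params
instance (src : String) (params : List (String × String)) (out : String) : Decidable (Spec_build_video_include_py src params out) := by unfold Spec_build_video_include_py; infer_instance

-- ===== CLAIM (what is proved, stated in full; the proofs are below) =====
def Claim_equal_build_video_include_py : Prop := ∀ (src : String) (params : List (String × String)), Dom_build_video_include_py src params → Pre_build_video_include_py src params → Spec_build_video_include_py src params (build_video_include_py src params)

-- ===== LEMMAS AND PROOFS =====

theorem insertBy_skip {α : Type} (before : α → α → Bool) (x : α) (p q : List α)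
    (hb : ∀ y ∈ p, before x y = false) :
    PySem.List.insertBy before x (p ++ q) = p ++ PySem.List.insertBy before x q := by
  induction p with
  | nil => simp
  | cons a t ih =>
    have ha : before x a = false := hb a (List.mem_cons_self ..)
    simp [PySem.List.insertBy, ha, ih (fun y hy => hb y (List.mem_cons_of_mem _ hy))]

theorem insertBy_front {α : Type} (before : α → α → Bool) (x : α) (q : List α)
    (hb : ∀ y ∈ q, before x y = true) :
    PySem.List.insertBy before x q = x :: q := by
  cases q with
  | nil => simp [PySem.List.insertBy]
  | cons a t => simp [PySem.List.insertBy, hb a (List.mem_cons_self ..)]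

theorem sorted_rank_eq (l : List (String × String)) :
    PySem.List.sorted l (fun kv => pvRank kv.1) false =
      l.filter (fun kv => kv.1 == "width") ++ l.filter (fun kv => kv.1 == "height")
      ++ l.filter (fun kv => kv.1 == "controls")
      ++ l.filter (fun kv => !(kv.1 == "width" || kv.1 == "height" || kv.1 == "controls")) := by
  rw [PySem.List.sorted_eq_foldl_insertBy]
  induction l using List.reverseRecOn with
  | nil => simp
  | append_singleton t x ih =>
    rw [List.foldl_append, List.foldl_cons, List.foldl_nil, ih]
    have r0 : ∀ y ∈ t.filter (fun kv => kv.1 == "width"), pvRank y.1 = 0 := by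
      intro y hy
      have := List.of_mem_filter hy; simp only [beq_iff_eq] at this; simp [pvRank, this]
    have r1 : ∀ y ∈ t.filter (fun kv => kv.1 == "height"), pvRank y.1 = 1 := by
      intro y hy
      have := List.of_mem_filter hy; simp only [beq_iff_eq] at this; simp [pvRank, this]
    have r2 : ∀ y ∈ t.filter (fun kv => kv.1 == "controls"), pvRank y.1 = 2 := by
      intro y hy
      have := List.of_mem_filter hy; simp only [beq_iff_eq] at this; simp [pvRank, this]
    have r3 : ∀ y ∈ t.filter (fun kv => !(kv.1 == "width" || kv.1 == "height" || kv.1 == "controls")),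
        pvRank y.1 = 3 := by
      intro y hy
      have := List.of_mem_filter hy
      simp only [Bool.not_eq_eq_eq_not, Bool.not_true, Bool.or_eq_false_iff, beq_eq_false_iff_ne] at this
      simp [pvRank, this.1.1, this.1.2, this.2]
    by_cases hw : x.1 = "width"
    · have hx : pvRank x.1 = 0 := by simp [pvRank, hw]
      rw [show t.filter (fun kv => kv.1 == "width") ++ t.filter (fun kv => kv.1 == "height")
            ++ t.filter (fun kv => kv.1 == "controls")
            ++ t.filter (fun kv => !(kv.1 == "width" || kv.1 == "height" || kv.1 == "controls"))
          = t.filter (fun kv => kv.1 == "width") ++ (t.filter (fun kv => kv.1 == "height")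
            ++ (t.filter (fun kv => kv.1 == "controls")
            ++ t.filter (fun kv => !(kv.1 == "width" || kv.1 == "height" || kv.1 == "controls"))))
          from by simp [List.append_assoc],
        insertBy_skip _ _ _ _ (by
          intro y hy; simp only [decide_eq_false_iff_not, hx, r0 y hy]; norm_num),
        insertBy_front _ _ _ (by
          intro y hy
          simp only [List.mem_append] at hy
          simp only [decide_eq_true_eq, hx]
          rcases hy with h | h | h
          · rw [r1 y h]; norm_num
          · rw [r2 y h]; norm_num
          · rw [r3 y h]; norm_num)]
      simp [List.filter_append, List.filter_cons, hw]
    · by_cases hh : x.1 = "height"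
      · have hx : pvRank x.1 = 1 := by simp [pvRank, hh, hw]
        rw [show t.filter (fun kv => kv.1 == "width") ++ t.filter (fun kv => kv.1 == "height")
              ++ t.filter (fun kv => kv.1 == "controls")
              ++ t.filter (fun kv => !(kv.1 == "width" || kv.1 == "height" || kv.1 == "controls"))
            = (t.filter (fun kv => kv.1 == "width") ++ t.filter (fun kv => kv.1 == "height"))
              ++ (t.filter (fun kv => kv.1 == "controls")
              ++ t.filter (fun kv => !(kv.1 == "width" || kv.1 == "height" || kv.1 == "controls")))
            from by simp [List.append_assoc],
          insertBy_skip _ _ _ _ (by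
            intro y hy
            simp only [List.mem_append] at hy
            simp only [decide_eq_false_iff_not, hx]
            rcases hy with h | h
            · rw [r0 y h]; norm_num
            · rw [r1 y h]; norm_num),
          insertBy_front _ _ _ (by
            intro y hy
            simp only [List.mem_append] at hy
            simp only [decide_eq_true_eq, hx]
            rcases hy with h | h
            · rw [r2 y h]; norm_num
            · rw [r3 y h]; norm_num)]
        simp [List.filter_append, List.filter_cons, hw, hh]
      · by_cases hc : x.1 = "controls"
        · have hx : pvRank x.1 = 2 := by simp [pvRank, hw, hh, hc]
          rw [show t.filter (fun kv => kv.1 == "width") ++ t.filter (fun kv => kv.1 == "height")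
                ++ t.filter (fun kv => kv.1 == "controls")
                ++ t.filter (fun kv => !(kv.1 == "width" || kv.1 == "height" || kv.1 == "controls"))
              = (t.filter (fun kv => kv.1 == "width") ++ (t.filter (fun kv => kv.1 == "height")
                ++ t.filter (fun kv => kv.1 == "controls")))
                ++ t.filter (fun kv => !(kv.1 == "width" || kv.1 == "height" || kv.1 == "controls"))
              from by simp [List.append_assoc],
            insertBy_skip _ _ _ _ (by
              intro y hy
              simp only [List.mem_append] at hy
              simp only [decide_eq_false_iff_not, hx]
              rcases hy with h | h | h
              · rw [r0 y h]; norm_num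
              · rw [r1 y h]; norm_num
              · rw [r2 y h]; norm_num),
            insertBy_front _ _ _ (by
              intro y hy; simp only [decide_eq_true_eq, hx, r3 y hy]; norm_num)]
          simp [List.filter_append, List.filter_cons, hw, hh, hc]
        · have hx : pvRank x.1 = 3 := by simp [pvRank, hw, hh, hc]
          rw [show t.filter (fun kv => kv.1 == "width") ++ t.filter (fun kv => kv.1 == "height")
                ++ t.filter (fun kv => kv.1 == "controls")
                ++ t.filter (fun kv => !(kv.1 == "width" || kv.1 == "height" || kv.1 == "controls"))
              = (t.filter (fun kv => kv.1 == "width") ++ (t.filter (fun kv => kv.1 == "height")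
                ++ (t.filter (fun kv => kv.1 == "controls")
                ++ t.filter (fun kv => !(kv.1 == "width" || kv.1 == "height" || kv.1 == "controls")))))
                ++ ([] : List (String × String))
              from by simp [List.append_assoc],
            insertBy_skip _ _ _ _ (by
              intro y hy
              simp only [List.mem_append] at hy
              simp only [decide_eq_false_iff_not, hx]
              rcases hy with h | h | h | h
              · rw [r0 y h]; norm_num
              · rw [r1 y h]; norm_num
              · rw [r2 y h]; norm_num
              · rw [r3 y h]; norm_num),
            insertBy_front _ _ _ (by intro y hy; simp at hy)]
          simp [List.filter_append, List.filter_cons, hw, hh, hc]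

theorem filter_key (K : String) (l : List (String × String)) (h : (l.map Prod.fst).Nodup) :
    l.filter (fun kv => kv.1 == K) =
      (match pyLookup l K with | some v => [(K, v)] | none => []) := by
  induction l with
  | nil => simp [pyLookup]
  | cons a t ih =>
    obtain ⟨a1, a2⟩ := a
    simp only [List.map_cons, List.nodup_cons] at h
    by_cases hk : a1 = K
    · subst hk
      have ht : t.filter (fun kv => kv.1 == a1) = [] := by
        rw [List.filter_eq_nil_iff]
        intro kv hkv
        simp only [beq_iff_eq]
        intro hq
        exact h.1 (by rw [← hq]; exact List.mem_map_of_mem hkv)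
      simp [List.filter_cons, pyLookup, ht]
    · simp [List.filter_cons, pyLookup, hk, ih h.2]

-- ===== VERDICT (by name: the statement is the Claim_ definition above) =====
theorem build_video_include_py_spec : Claim_equal_build_video_include_py := by
  intro src params _ hpre
  unfold Spec_build_video_include_py build_video_include_py build_video_include_py_alt
  dsimp only
  rw [sorted_rank_eq, PySem.List.foldl_append_if]
  simp only [List.foldl_cons, List.foldl_nil]
  rw [filter_key "width" params hpre, filter_key "height" params hpre,
      filter_key "controls" params hpre]
  cases hw : pyLookup params "width" <;> cases hh : pyLookup params "height" <;>
    cases hc : pyLookup params "controls" <;> simp [List.map_append, List.append_assoc]
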